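-- pv_equiv track=rewrite | github.com/TFG-SensitiBot/SensitiBot | reader/reader.py | analize_headers
-- ===== SOURCE A (Python) =====
-- import itertools
--
-- def analize_headers(name, headers):
--     """
--     Analyzes the headers of a file.
--
--     Args:
--         name (str): The name of the file.
--         headers (list): The headers of the file.
--
--     Returns:
--         list: The headers that may have sensitive information.
--     """
--     terms = ["email", "phone", "mobile", "iban", "account", "sha", "gpg", "socialsecurity",
--              "creditcard", "debitcard", "card", "name", "surname", "lastname", "firstname", "dni",
--              "license", "licenses", "lecenseplates", "ip", "ips", "address", "addresses", "gps",
--              "coordinate", "coordinates", "location", "password", "latitud", "latitude", "longitud",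
--              "longitude", "passwords", "secret", "secrets", "key", "hash"]
--     suffixes = ["number", "value", "key"]
--
--     combinations = []
--     for term, suffix in itertools.product(terms, suffixes):
--         combinations.append(term)
--         combinations.append(term + ' ' + suffix)
--         combinations.append(term + suffix)
--
--     positive_headers = []
--     for header in headers:
--         header = header.strip().lower()
--         if header in combinations:
--             positive_headers.append(header)
--
--     return positive_headers
-- ===== SOURCE B (Python) =====
-- def analize_headers(name, headers):
--     """
--     Same result as the original, but without precomputing the 333
--     term/suffix combination strings: each stripped/lowered header is
--     tested directly against the term set, either as-is or by stripping
--     a trailing suffix (with or without a separating space) and looking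
--     the remaining prefix up in the set.
--     """
--     terms = set(("email phone mobile iban account sha gpg socialsecurity creditcard debitcard "
--                  "card name surname lastname firstname dni license licenses lecenseplates ip ips "
--                  "address addresses gps coordinate coordinates location password latitud latitude "
--                  "longitud longitude passwords secret secrets key hash").split())
--     suffixes = ("number", "value", "key")
--
--     def sensitive(h):
--         if h in terms:
--             return True
--         for s in suffixes:
--             for sep in (' ', ''):
--                 tail = sep + s
--                 if h.endswith(tail) and h[:len(h) - len(tail)] in terms:
--                     return True
--         return False
--
--     return [h for h in (x.strip().lower() for x in headers) if sensitive(h)]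
-- ===== Notes on version B (the rewrite author's own statement) =====
-- stated objective: simpler
-- what changed: B drops A's precomputed 333-entry combinations list and its membership scan entirely: each stripped/lowered header is classified by a direct predicate that looks the header up in the term set, either as-is or after stripping a trailing suffix (with or without a separating space), and the result is built as a filter of the mapped headers instead of an appending loop.
import Mathlib
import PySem

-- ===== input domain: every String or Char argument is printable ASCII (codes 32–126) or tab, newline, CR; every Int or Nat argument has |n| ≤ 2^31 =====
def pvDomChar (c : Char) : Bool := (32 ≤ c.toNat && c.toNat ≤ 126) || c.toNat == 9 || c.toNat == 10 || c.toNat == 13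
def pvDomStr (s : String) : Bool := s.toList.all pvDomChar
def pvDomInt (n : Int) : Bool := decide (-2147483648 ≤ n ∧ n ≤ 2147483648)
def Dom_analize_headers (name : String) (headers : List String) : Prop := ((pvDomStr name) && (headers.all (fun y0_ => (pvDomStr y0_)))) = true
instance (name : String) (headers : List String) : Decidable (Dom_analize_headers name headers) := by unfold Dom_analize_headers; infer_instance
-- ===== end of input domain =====

-- B is simpler: no precomputed 333-entry combinations list — each stripped/lowered
-- header is tested directly against the term set, stripping a trailing suffix
-- (with or without a separating space) when present.

-- ===== PORT A =====
def pvTermsA : List (List Char) :=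
  ["email".toList, "phone".toList, "mobile".toList, "iban".toList, "account".toList,
   "sha".toList, "gpg".toList, "socialsecurity".toList, "creditcard".toList,
   "debitcard".toList, "card".toList, "name".toList, "surname".toList, "lastname".toList,
   "firstname".toList, "dni".toList, "license".toList, "licenses".toList,
   "lecenseplates".toList, "ip".toList, "ips".toList, "address".toList,
   "addresses".toList, "gps".toList, "coordinate".toList, "coordinates".toList,
   "location".toList, "password".toList, "latitud".toList, "latitude".toList,
   "longitud".toList, "longitude".toList, "passwords".toList, "secret".toList,
   "secrets".toList, "key".toList, "hash".toList]

def pvSuffixesA : List (List Char) := ["number".toList, "value".toList, "key".toList]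

-- itertools.product(terms, suffixes) is the nested loop over terms then suffixes
def pvCombinations : List (List Char) :=
  pvTermsA.foldl (fun acc t =>
    pvSuffixesA.foldl (fun acc2 s =>
      acc2 ++ [t] ++ [t ++ (' ' :: s)] ++ [t ++ s]) acc) []

def analize_headers (name : String) (headers : List String) : List String :=
  headers.foldl (fun acc header =>
    let h := PySem.Chars.lower (PySem.Chars.strip header.toList)
    if h ∈ pvCombinations then acc ++ [String.ofList h] else acc) []

-- ===== PORT B =====
-- terms = set("email phone … hash".split())
def pvTermsB : PySem.Set (List Char) :=
  PySem.Set.ofList (PySem.Chars.split₀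
    ("email phone mobile iban account sha gpg socialsecurity creditcard debitcard " ++
     "card name surname lastname firstname dni license licenses lecenseplates ip ips " ++
     "address addresses gps coordinate coordinates location password latitud latitude " ++
     "longitud longitude passwords secret secrets key hash").toList)

def pvSuffixesB : List (List Char) := ["number".toList, "value".toList, "key".toList]

-- def sensitive(h): the early-return nested loop over suffixes × separators
def pvSensitive (h : List Char) : Bool :=
  if decide (h ∈ pvTermsB) then true
  else pvSuffixesB.any (fun s =>
    [[' '], ([] : List Char)].any (fun sep =>
      let tail := sep ++ s
      PySem.Chars.endswith h tail &&
        decide (PySem.List.slice h none (some ((h.length : Int) - tail.length)) ∈ pvTermsB)))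

-- the comprehension: map (strip/lower), filter, back to String
def analize_headers_alt (name : String) (headers : List String) : List String :=
  ((headers.map (fun x => PySem.Chars.lower (PySem.Chars.strip x.toList))).filter
    pvSensitive).map String.ofList

-- ===== PRECONDITION & SPEC =====
def Spec_analize_headers (name : String) (headers : List String) (out : List String) : Prop := out = analize_headers_alt name headers
instance (name : String) (headers : List String) (out : List String) : Decidable (Spec_analize_headers name headers out) := by unfold Spec_analize_headers; infer_instance

-- ===== CLAIM (what is proved, stated in full; the proofs are below) =====
def Claim_equal_analize_headers : Prop := ∀ (name : String) (headers : List String), Dom_analize_headers name headers → Spec_analize_headers name headers (analize_headers name headers)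

-- ===== LEMMAS AND PROOFS =====

-- B's split term set lists exactly A's terms
set_option maxRecDepth 4096 in
theorem pvTermsB_eq : pvTermsB = pvTermsA := by decide

-- the nested product loop builds exactly the flatMap of the three shapes
theorem pvCombinations_eq :
    pvCombinations = pvTermsA.flatMap (fun t =>
      pvSuffixesA.flatMap (fun s => [t] ++ [t ++ (' ' :: s)] ++ [t ++ s])) := by
  have inner : ∀ (t : List Char) (acc : List (List Char)),
      pvSuffixesA.foldl (fun acc2 s => acc2 ++ [t] ++ [t ++ (' ' :: s)] ++ [t ++ s]) acc
        = acc ++ pvSuffixesA.flatMap (fun s => [t] ++ [t ++ (' ' :: s)] ++ [t ++ s]) := by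
    intro t acc
    have := PySem.List.foldl_append_eq_flatMap
      (fun s => [t] ++ [t ++ (' ' :: s)] ++ [t ++ s]) pvSuffixesA acc
    simpa [List.append_assoc] using this
  unfold pvCombinations
  simp only [inner]
  simpa using PySem.List.foldl_append_eq_flatMap
    (fun t => pvSuffixesA.flatMap (fun s => [t] ++ [t ++ (' ' :: s)] ++ [t ++ s])) pvTermsA []

-- endswith + prefix-strip characterizes "h is some t ∈ T followed by q"
theorem pvStripSuffix_iff (T : List (List Char)) (h q : List Char) :
    (q <:+ h ∧ PySem.List.slice h none (some ((h.length : Int) - q.length)) ∈ T)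
    ↔ ∃ t ∈ T, h = t ++ q := by
  constructor
  · rintro ⟨⟨pre, rfl⟩, hm⟩
    refine ⟨pre, ?_, rfl⟩
    have hb : ((pre ++ q).length : Int) - q.length = (pre.length : Int) := by
      simp [List.length_append]
    rw [hb, PySem.List.slice_to _ (by positivity)] at hm
    simpa using hm
  · rintro ⟨t, ht, rfl⟩
    refine ⟨⟨t, rfl⟩, ?_⟩
    have hb : ((t ++ q).length : Int) - q.length = (t.length : Int) := by
      simp [List.length_append]
    rw [hb, PySem.List.slice_to _ (by positivity)]
    simpa using ht

theorem pvSensitive_iff (h : List Char) : pvSensitive h = true ↔ h ∈ pvCombinations := by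
  rw [pvCombinations_eq]
  unfold pvSensitive
  rw [pvTermsB_eq]
  split_ifs with hm
  · simp only [decide_eq_true_eq] at hm
    simp only [true_iff, List.mem_flatMap, List.mem_append, List.mem_singleton]
    exact ⟨h, hm, "number".toList, by simp [pvSuffixesA], Or.inl (Or.inl rfl)⟩
  · simp only [decide_eq_true_eq] at hm
    simp only [List.any_cons, List.any_nil, Bool.or_false, List.singleton_append,
      List.nil_append, List.any_eq_true, Bool.or_eq_true, Bool.and_eq_true,
      decide_eq_true_eq, PySem.Chars.endswith_iff, pvStripSuffix_iff pvTermsA,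
      List.mem_flatMap, List.mem_append, List.mem_cons, List.not_mem_nil, or_false]
    rw [show pvSuffixesB = pvSuffixesA from rfl]
    constructor
    · rintro ⟨s, hs, (⟨t, ht, rfl⟩ | ⟨t, ht, rfl⟩)⟩
      · exact ⟨t, ht, s, hs, Or.inl (Or.inr rfl)⟩
      · exact ⟨t, ht, s, hs, Or.inr rfl⟩
    · rintro ⟨t, ht, s, hs, ((rfl | rfl) | rfl)⟩
      · exact absurd ht hm
      · exact ⟨s, hs, Or.inl ⟨t, ht, rfl⟩⟩
      · exact ⟨s, hs, Or.inr ⟨t, ht, rfl⟩⟩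

-- A's appending foldl is the filter/map pipeline of B
theorem pvFold_eq (hs : List String) (acc : List String) :
    hs.foldl (fun acc header =>
      let h := PySem.Chars.lower (PySem.Chars.strip header.toList)
      if h ∈ pvCombinations then acc ++ [String.ofList h] else acc) acc
    = acc ++ ((hs.map (fun x => PySem.Chars.lower (PySem.Chars.strip x.toList))).filter
        pvSensitive).map String.ofList := by
  induction hs generalizing acc with
  | nil => simp
  | cons x xs ih =>
    simp only [List.foldl_cons, List.map_cons, List.filter_cons]
    by_cases hm : pvSensitive (PySem.Chars.lower (PySem.Chars.strip x.toList)) = true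
    · rw [if_pos ((pvSensitive_iff _).mp hm)]
      simp only [hm, ih, List.map_cons, List.append_assoc, List.singleton_append, if_true]
    · rw [if_neg (fun hc => hm ((pvSensitive_iff _).mpr hc))]
      simp only [Bool.not_eq_true] at hm
      simp only [hm, ih, Bool.false_eq_true, if_false]

-- ===== VERDICT (by name: the statement is the Claim_ definition above) =====
theorem analize_headers_spec : Claim_equal_analize_headers := by
  intro name headers _
  unfold Spec_analize_headers analize_headers analize_headers_alt
  simpa using pvFold_eq headers []
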